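-- pv_equiv track=rewrite | github.com/YXMforfun/_checkio-solution | electronic_station/weak-point.py | weak_point
-- ===== SOURCE A (Python) =====
-- def weak_point(matrix):
--     m = 10000
--     minI = 0
--     minJ = 0
--     for i, line in enumerate(matrix):
--         if m > sum(line):
--             m = sum(line)
--             minI = i
--     m = 10000
--     for j, line in enumerate(zip(*matrix)):
--         # line =>  ( [row][col], [row+1][col] ...)
--         if m > sum(line):
--             m = sum(line)
--             minJ = j
--     return minI, minJ
-- ===== SOURCE B (Python) =====
-- def weak_point(matrix):
--     best = 10000
--     min_i = 0
--     col_sums = None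
--     for i, row in enumerate(matrix):
--         total = 0
--         for x in row:
--             total += x
--         if col_sums is None:
--             col_sums = list(row)
--         else:
--             col_sums = [a + b for a, b in zip(col_sums, row)]
--         if best > total:
--             best = total
--             min_i = i
--     best = 10000
--     min_j = 0
--     for j, c in enumerate(col_sums if col_sums is not None else []):
--         if best > c:
--             best = c
--             min_j = j
--     return min_i, min_j
-- ===== Notes on version B (the rewrite author's own statement) =====
-- stated objective: alternative
-- what changed: A makes two passes, the second over the transposed matrix built by zip(*matrix); B makes one forward pass that accumulates each row's total and element-wise column sums (truncating like zip on ragged rows) and then selects the minimal column from the accumulated sums, never transposing.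
import Mathlib
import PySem

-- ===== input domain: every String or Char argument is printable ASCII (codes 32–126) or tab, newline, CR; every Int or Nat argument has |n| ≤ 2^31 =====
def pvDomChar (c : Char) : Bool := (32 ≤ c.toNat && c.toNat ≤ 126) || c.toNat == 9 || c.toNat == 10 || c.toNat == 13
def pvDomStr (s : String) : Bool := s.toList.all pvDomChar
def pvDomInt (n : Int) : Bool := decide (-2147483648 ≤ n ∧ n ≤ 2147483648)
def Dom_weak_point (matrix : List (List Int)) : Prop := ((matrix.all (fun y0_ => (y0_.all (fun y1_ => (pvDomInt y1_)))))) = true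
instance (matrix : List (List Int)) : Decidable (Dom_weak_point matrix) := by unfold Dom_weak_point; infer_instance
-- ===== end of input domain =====

-- B replaces A's second pass over the transposed matrix (zip(*matrix)) by one forward pass
-- that accumulates column sums alongside the row minimum (alternative decomposition, same cost).

-- ===== PORT A =====
-- zip(*matrix): truncated transpose, exactly Python's zip over the row iterators
def zipStar : List (List Int) → List (List Int)
  | [] => []
  | r :: rs =>
    if r.isEmpty || rs.any List.isEmpty then []
    else (r.headD 0 :: rs.map (fun x => x.headD 0)) :: zipStar (r.tail :: rs.map List.tail)
termination_by l => (l.headD []).length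
decreasing_by
  simp_all only [List.headD_cons]
  cases r with
  | nil => simp_all
  | cons a t => simp

def weak_point (matrix : List (List Int)) : Int × Int :=
  let s1 := (PySem.List.enumerate matrix 0).foldl
    (fun (st : Int × Int) p => if st.1 > p.2.sum then (p.2.sum, p.1) else st) (10000, 0)
  let s2 := (PySem.List.enumerate (zipStar matrix) 0).foldl
    (fun (st : Int × Int) p => if st.1 > p.2.sum then (p.2.sum, p.1) else st) (10000, 0)
  (s1.2, s2.2)

-- ===== PORT B =====
-- one step of B's single pass: row total by an explicit accumulator, col_sums via zip truncation
def bRowStep (st : Int × Int × Option (List Int)) (p : Int × List Int) :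
    Int × Int × Option (List Int) :=
  let total := p.2.foldl (· + ·) 0
  let cs : Option (List Int) :=
    match st.2.2 with
    | none => some p.2
    | some a => some (List.zipWith (· + ·) a p.2)
  if st.1 > total then (total, p.1, cs) else (st.1, st.2.1, cs)

def weak_point_alt (matrix : List (List Int)) : Int × Int :=
  let st := (PySem.List.enumerate matrix 0).foldl bRowStep (10000, 0, none)
  let cols : List Int := match st.2.2 with | none => [] | some l => l
  let s2 := (PySem.List.enumerate cols 0).foldl
    (fun (q : Int × Int) p => if q.1 > p.2 then (p.2, p.1) else q) (10000, 0)
  (st.2.1, s2.2)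

-- ===== PRECONDITION & SPEC =====
def Spec_weak_point (matrix : List (List Int)) (out : Int × Int) : Prop := out = weak_point_alt matrix
instance (matrix : List (List Int)) (out : Int × Int) : Decidable (Spec_weak_point matrix out) := by unfold Spec_weak_point; infer_instance

-- ===== CLAIM (what is proved, stated in full; the proofs are below) =====
def Claim_equal_weak_point : Prop := ∀ (matrix : List (List Int)), Dom_weak_point matrix → Spec_weak_point matrix (weak_point matrix)

-- ===== LEMMAS AND PROOFS =====

theorem zipStar_nil : zipStar [] = [] := by rw [zipStar]

theorem zipStar_cons (r : List Int) (rs : List (List Int)) :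
    zipStar (r :: rs) =
      if r.isEmpty || rs.any List.isEmpty then []
      else (r.headD 0 :: rs.map (fun x => x.headD 0)) :: zipStar (r.tail :: rs.map List.tail) := by
  rw [zipStar]

theorem zipStar_empty_head (rs : List (List Int)) : zipStar ([] :: rs) = [] := by
  rw [zipStar_cons]; simp

-- row totals: B's explicit accumulator equals A's sum(line)
theorem foldl_add_eq_sum (l : List Int) (a : Int) : l.foldl (· + ·) a = a + l.sum := by
  induction l generalizing a with
  | nil => simp
  | cons x xs ih => simp [List.foldl_cons, ih, List.sum_cons]; ring

-- B's combined fold splits: the (best, min_i) part is A's first loop, the col_sums part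
-- is an independent fold of the rows
theorem bfold_split (L : List (Int × List Int)) (st : Int × Int × Option (List Int)) :
    L.foldl bRowStep st =
      ((L.foldl (fun (q : Int × Int) p => if q.1 > p.2.sum then (p.2.sum, p.1) else q) (st.1, st.2.1)).1,
       (L.foldl (fun (q : Int × Int) p => if q.1 > p.2.sum then (p.2.sum, p.1) else q) (st.1, st.2.1)).2,
       L.foldl (fun (o : Option (List Int)) p =>
          match o with
          | none => some p.2
          | some a => some (List.zipWith (· + ·) a p.2)) st.2.2) := by
  induction L generalizing st with
  | nil => rfl
  | cons p L ih =>
    rw [List.foldl_cons, ih]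
    have h1 : ((bRowStep st p).1, (bRowStep st p).2.1) =
        (if st.1 > p.2.sum then (p.2.sum, p.1) else (st.1, st.2.1)) := by
      simp only [bRowStep, foldl_add_eq_sum, zero_add]
      split <;> rfl
    have h2 : (bRowStep st p).2.2 =
        (match st.2.2 with
         | none => some p.2
         | some a => some (List.zipWith (· + ·) a p.2)) := by
      simp only [bRowStep]
      split <;> rfl
    rw [h1, h2, List.foldl_cons, List.foldl_cons]

-- the option fold becomes a plain zipWith-fold once started
theorem optfold_some (L : List (List Int)) (a : List Int) :
    L.foldl (fun (o : Option (List Int)) row =>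
        match o with
        | none => some row
        | some b => some (List.zipWith (· + ·) b row)) (some a) =
      some (L.foldl (fun (b : List Int) row => List.zipWith (· + ·) b row) a) := by
  induction L generalizing a with
  | nil => rfl
  | cons r L ih => simp only [List.foldl_cons, ih]

theorem zipStar_single (r : List Int) : (zipStar [r]).map List.sum = r := by
  induction r with
  | nil => rw [zipStar_cons]; simp
  | cons x t ih => rw [zipStar_cons]; simpa using ih

-- merging the first two rows elementwise does not change the column sums
theorem zipStar_merge (a : List Int) : ∀ (b : List Int) (rs : List (List Int)),
    (zipStar (a :: b :: rs)).map List.sum =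
      (zipStar (List.zipWith (· + ·) a b :: rs)).map List.sum := by
  induction a with
  | nil => intro b rs; simp [zipStar_empty_head]
  | cons x a' ih =>
    intro b rs
    cases b with
    | nil =>
      rw [zipStar_cons (x :: a'), zipStar_cons (List.zipWith (· + ·) (x :: a') [])]
      simp
    | cons y b' =>
      rw [List.zipWith_cons_cons, zipStar_cons (x :: a'), zipStar_cons ((x + y) :: List.zipWith (· + ·) a' b')]
      by_cases h : rs.any List.isEmpty
      · simp [h]
      · simp only [List.isEmpty_cons, List.any_cons, h, Bool.or_false,
          List.zipWith_cons_cons, Bool.false_eq_true, if_false, List.map_cons, List.sum_cons,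
          List.headD_cons, List.tail_cons]
        rw [ih b' (rs.map List.tail)]
        congr 1
        ring

-- the zipWith-fold computes exactly the sums of zip(*matrix)'s columns
theorem fold_eq_zipStar_sums (rs : List (List Int)) : ∀ (r : List Int),
    rs.foldl (fun (b : List Int) (row : List Int) => List.zipWith (· + ·) b row) r =
      (zipStar (r :: rs)).map List.sum := by
  induction rs with
  | nil => intro r; simp [zipStar_single]
  | cons s rs ih =>
    intro r
    rw [List.foldl_cons, ih, ← zipStar_merge]

theorem enumerate_map {α β : Type} (f : α → β) (L : List α) (s : Int) :
    PySem.List.enumerate (L.map f) s = (PySem.List.enumerate L s).map (fun p => (p.1, f p.2)) := by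
  induction L generalizing s with
  | nil => simp [PySem.List.enumerate_nil]
  | cons x t ih => simp [PySem.List.enumerate_cons, ih]

-- A's second loop over the transposed matrix equals B's loop over the accumulated column sums
theorem minJ_loop (cols : List (List Int)) (q : Int × Int) :
    (PySem.List.enumerate cols 0).foldl
        (fun (st : Int × Int) p => if st.1 > p.2.sum then (p.2.sum, p.1) else st) q =
      (PySem.List.enumerate (cols.map List.sum) 0).foldl
        (fun (st : Int × Int) p => if st.1 > p.2 then (p.2, p.1) else st) q := by
  rw [enumerate_map, List.foldl_map]

-- the col_sums component of B's fold only depends on the rows, not the indices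
theorem optfold_snd_eq (L : List (List Int)) (s : Int) (o : Option (List Int)) :
    (PySem.List.enumerate L s).foldl (fun (acc : Option (List Int)) (p : Int × List Int) =>
        match acc with
        | none => some p.2
        | some b => some (List.zipWith (· + ·) b p.2)) o =
      L.foldl (fun (acc : Option (List Int)) row =>
        match acc with
        | none => some row
        | some b => some (List.zipWith (· + ·) b row)) o := by
  induction L generalizing s o with
  | nil => simp [PySem.List.enumerate_nil]
  | cons r t ih => simp only [PySem.List.enumerate_cons, List.foldl_cons, ih]

-- ===== VERDICT (by name: the statement is the Claim_ definition above) =====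
theorem weak_point_spec : Claim_equal_weak_point := by
  intro matrix _
  unfold Spec_weak_point weak_point weak_point_alt
  rw [bfold_split]
  refine Prod.ext rfl ?_
  simp only
  rw [optfold_snd_eq]
  cases matrix with
  | nil => simp [zipStar_nil, PySem.List.enumerate_nil]
  | cons r rs =>
    rw [List.foldl_cons, optfold_some, fold_eq_zipStar_sums, minJ_loop]
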